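-- pv_equiv track=rewrite | github.com/mmshihov/discrete-math | code/python/kvain-petrick.py | petrickConditon
-- ===== SOURCE A (Python) =====
-- def isCover(impli, consti, n):
--     i=0
--     while (i < n):
--         argConsti = consti[i+1:i+2]
--         argImpli  = impli[i+1:i+2]
--         if (argImpli == "1" or argImpli == "0"):
--             if (argImpli != argConsti):
--                 return False
--         i = i + 1
--     return True
--
-- def petrickConditon(sdnf, dnf, n):
--     knfs = []
--     for consti in sdnf:
--         knf = []
--         i = 0
--         while (i < len(dnf)):
--             if (isCover(dnf[i], consti, n)):
--                 knf.append(i)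
--             i = i + 1
--         knfs.append(knf)
--     return knfs
-- ===== SOURCE B (Python) =====
-- def petrickConditon(sdnf, dnf, n):
--     # precompute each implicant's fixed-bit constraints once, then test minterms against them
--     cons_list = []
--     for impli in dnf:
--         cons_list.append([(j, c) for j, c in enumerate(impli)
--                           if 1 <= j <= n and (c == '0' or c == '1')])
--     return [[i for i, cons in enumerate(cons_list)
--              if all(j < len(consti) and consti[j] == c for j, c in cons)]
--             for consti in sdnf]
-- ===== Notes on version B (the rewrite author's own statement) =====
-- stated objective: faster
-- what changed: Instead of re-slicing each implicant string n times per (minterm, implicant) pair, B precomputes each implicant's fixed-bit (index, char) constraints once by scanning its characters, then filters implicant indices per minterm by checking only those constraints.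
import Mathlib
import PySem

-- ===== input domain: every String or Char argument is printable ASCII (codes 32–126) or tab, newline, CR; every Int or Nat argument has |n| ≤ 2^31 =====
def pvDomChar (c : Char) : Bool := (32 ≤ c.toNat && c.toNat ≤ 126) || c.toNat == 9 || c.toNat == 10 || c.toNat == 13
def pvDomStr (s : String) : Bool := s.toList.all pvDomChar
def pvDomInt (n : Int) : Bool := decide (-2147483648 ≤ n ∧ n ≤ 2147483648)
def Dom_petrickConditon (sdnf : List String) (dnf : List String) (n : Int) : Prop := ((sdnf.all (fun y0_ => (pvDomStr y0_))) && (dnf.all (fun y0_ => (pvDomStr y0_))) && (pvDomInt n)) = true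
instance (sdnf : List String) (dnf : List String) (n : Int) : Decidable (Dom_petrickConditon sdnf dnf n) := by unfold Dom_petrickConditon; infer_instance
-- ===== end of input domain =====

-- B precomputes each implicant's fixed-bit (index, char) constraints once instead of
-- re-slicing the strings n times per (minterm, implicant) pair; return values are identical.

-- ===== PORT A =====
def isCoverAux (impli : String) (consti : String) (n : Int) (i : Int) : Bool :=
  if _h : i < n then
    let argConsti := PySem.Str.slice consti (some (i+1)) (some (i+2))
    let argImpli  := PySem.Str.slice impli (some (i+1)) (some (i+2))
    if (argImpli == "1" || argImpli == "0") && argImpli != argConsti then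
      false
    else
      isCoverAux impli consti n (i+1)
  else
    true
termination_by (n - i).toNat
decreasing_by omega

def isCover (impli : String) (consti : String) (n : Int) : Bool :=
  isCoverAux impli consti n 0

def petrickConditon (sdnf : List String) (dnf : List String) (n : Int) : List (List Int) :=
  sdnf.foldl (fun knfs consti =>
    let knf := (PySem.List.pyRange 0 (dnf.length) 1).foldl
      (fun knf i =>
        if isCover (PySem.List.pyGetD dnf i "") consti n then knf ++ [i] else knf) []
    knfs ++ [knf]) []

-- ===== PORT B =====
def altCons (n : Int) (impli : String) : List (Int × Char) :=
  (PySem.List.enumerate impli.toList 0).filter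
    (fun jc => 1 ≤ jc.1 && jc.1 ≤ n && (jc.2 == '0' || jc.2 == '1'))

def altMatch (consti : String) (cons : List (Int × Char)) : Bool :=
  cons.all (fun jc =>
    match consti.toList[jc.1.toNat]? with
    | some c => c == jc.2
    | none => false)

def petrickConditon_alt (sdnf : List String) (dnf : List String) (n : Int) : List (List Int) :=
  let consList := dnf.map (altCons n)
  sdnf.map (fun consti =>
    ((PySem.List.enumerate consList 0).filter (fun ic => altMatch consti ic.2)).map (·.1))

-- ===== PRECONDITION & SPEC =====
def Spec_petrickConditon (sdnf : List String) (dnf : List String) (n : Int) (out : List (List Int)) : Prop := out = petrickConditon_alt sdnf dnf n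
instance (sdnf : List String) (dnf : List String) (n : Int) (out : List (List Int)) : Decidable (Spec_petrickConditon sdnf dnf n out) := by unfold Spec_petrickConditon; infer_instance

-- ===== CLAIM (what is proved, stated in full; the proofs are below) =====
def Claim_equal_petrickConditon : Prop := ∀ (sdnf : List String) (dnf : List String) (n : Int), Dom_petrickConditon sdnf dnf n → Spec_petrickConditon sdnf dnf n (petrickConditon sdnf dnf n)

-- ===== LEMMAS AND PROOFS =====

def stepOK (impli consti : String) (k : Int) : Bool :=
  let argConsti := PySem.Str.slice consti (some (k+1)) (some (k+2))
  let argImpli  := PySem.Str.slice impli (some (k+1)) (some (k+2))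
  !((argImpli == "1" || argImpli == "0") && argImpli != argConsti)

theorem slice_one (l : List Char) (k : Int) (hk : 0 ≤ k) :
    PySem.List.slice l (some (k+1)) (some (k+2)) =
      (match l[(k+1).toNat]? with | some c => [c] | none => []) := by
  rw [PySem.List.slice_toNat l (by omega) (by omega)]
  have h : (k+2).toNat - (k+1).toNat = 1 := by omega
  rw [h]
  cases hl : l.drop (k+1).toNat with
  | nil => simp [← List.head?_drop, hl]
  | cons c t => simp [← List.head?_drop, hl]

theorem stepOK_iff (impli consti : String) (k : Int) (hk : 0 ≤ k) :
    stepOK impli consti k = true ↔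
      (∀ c, impli.toList[(k+1).toNat]? = some c → (c = '0' ∨ c = '1') →
        consti.toList[(k+1).toNat]? = some c) := by
  have h1 : ("1" : String).toList = ['1'] := by decide
  have h0 : ("0" : String).toList = ['0'] := by decide
  have hbridge : ∀ s : String, (PySem.Str.slice s (some (k+1)) (some (k+2))).toList
      = PySem.List.slice s.toList (some (k+1)) (some (k+2)) := by
    intro s; simp [PySem.Str.slice]
  unfold stepOK
  simp only [bne, Bool.beq_eq_decide_eq, ← String.toList_inj, hbridge, h1, h0,
    slice_one _ _ hk]
  cases hI : impli.toList[(k+1).toNat]? with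
  | none => simp
  | some c =>
    cases hC : consti.toList[(k+1).toNat]? with
    | none => simp; tauto
    | some c' =>
      simp only [Bool.not_eq_true', Bool.and_eq_false_iff, Bool.or_eq_false_iff,
        decide_eq_false_iff_not, Bool.not_eq_false', decide_eq_true_eq, Option.some.injEq,
        List.cons_eq_cons, and_true]
      constructor
      · rintro h c1 rfl hor
        rcases h with ⟨ha, hb⟩ | he
        · tauto
        · exact he.symm
      · intro h
        by_cases hc : c = '0' ∨ c = '1'
        · right; exact (h c rfl hc).symm
        · left; tauto

theorem isCoverAux_iff (impli consti : String) (n : Int) (i : Int) :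
    isCoverAux impli consti n i = true ↔
      ∀ k : Int, i ≤ k → k < n → stepOK impli consti k = true := by
  generalize hf : (n - i).toNat = f
  induction f generalizing i with
  | zero =>
    have hni : ¬ i < n := by omega
    rw [isCoverAux.eq_def]
    simp only [hni, dite_false]
    constructor
    · intro _ k hik hkn; omega
    · intro _; trivial
  | succ m ih =>
    have hin : i < n := by omega
    rw [isCoverAux.eq_def]
    simp only [hin, dite_true]
    split_ifs with hcond
    · constructor
      · intro hfalse; cases hfalse
      · intro hall
        have := hall i le_rfl hin
        unfold stepOK at this
        simp only [hcond] at this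
        cases this
    · rw [ih (i+1) (by omega)]
      constructor
      · intro hall k hik hkn
        rcases eq_or_lt_of_le hik with heq | hlt
        · subst heq
          unfold stepOK
          simp only [Bool.not_eq_true] at hcond
          simp only [hcond]
          rfl
        · exact hall k (by omega) hkn
      · intro hall k hik hkn
        exact hall k (by omega) hkn

theorem altMatch_iff (impli consti : String) (n : Int) :
    altMatch consti (altCons n impli) = true ↔
      ∀ (j : Nat) (h : j < impli.toList.length), 1 ≤ (j : Int) → (j : Int) ≤ n →
        (impli.toList[j] = '0' ∨ impli.toList[j] = '1') →
        consti.toList[j]? = some (impli.toList[j]) := by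
  unfold altMatch altCons
  rw [List.all_eq_true]
  constructor
  · intro hall j h hj1 hjn hc
    have hmem : ((j : Int), impli.toList[j]) ∈ PySem.List.enumerate impli.toList 0 := by
      rw [PySem.List.mem_enumerate_iff]
      exact ⟨j, h, by simp⟩
    have hfil : ((j : Int), impli.toList[j]) ∈
        (PySem.List.enumerate impli.toList 0).filter
          (fun jc => 1 ≤ jc.1 && jc.1 ≤ n && (jc.2 == '0' || jc.2 == '1')) := by
      rw [List.mem_filter]
      refine ⟨hmem, ?_⟩
      simp only [Bool.and_eq_true, Bool.or_eq_true, decide_eq_true_eq, beq_iff_eq]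
      exact ⟨⟨hj1, hjn⟩, hc⟩
    have := hall _ hfil
    simp only [Int.toNat_natCast] at this
    cases hC : consti.toList[j]? with
    | none => rw [hC] at this; cases this
    | some c' =>
      rw [hC] at this
      simp only [beq_iff_eq] at this
      rw [this]
  · intro hp jc hmem
    rw [List.mem_filter] at hmem
    obtain ⟨hmem, hcond⟩ := hmem
    rw [PySem.List.mem_enumerate_iff] at hmem
    obtain ⟨j, h, rfl⟩ := hmem
    simp only [Bool.and_eq_true, Bool.or_eq_true, decide_eq_true_eq, beq_iff_eq] at hcond
    obtain ⟨⟨hj1, hjn⟩, hc⟩ := hcond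
    simp only [zero_add] at *
    have := hp j h (by exact_mod_cast hj1) (by exact_mod_cast hjn) hc
    simp only [Int.toNat_natCast, this, beq_self_eq_true]

theorem isCover_eq_altMatch (impli consti : String) (n : Int) :
    isCover impli consti n = altMatch consti (altCons n impli) := by
  rw [Bool.eq_iff_iff]
  unfold isCover
  rw [isCoverAux_iff, altMatch_iff]
  constructor
  · intro hA j h hj1 hjn hc
    have hk : (0:Int) ≤ (j:Int) - 1 := by omega
    have hstep := (stepOK_iff impli consti ((j:Int) - 1) hk).1
      (hA ((j:Int) - 1) hk (by omega))
    have hidx : (((j:Int) - 1) + 1).toNat = j := by omega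
    rw [hidx] at hstep
    exact hstep _ (List.getElem?_eq_getElem h) hc
  · intro hB k hk0 hkn
    rw [stepOK_iff impli consti k hk0]
    intro c hsome hc
    rw [List.getElem?_eq_some_iff] at hsome
    obtain ⟨h, hval⟩ := hsome
    have hj1 : 1 ≤ ((k+1).toNat : Int) := by omega
    have hjn : ((k+1).toNat : Int) ≤ n := by omega
    have := hB (k+1).toNat h hj1 hjn (by rw [hval]; exact hc)
    rw [hval] at this
    exact this

-- ===== VERDICT (by name: the statement is the Claim_ definition above) =====
theorem petrickConditon_spec : Claim_equal_petrickConditon := by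
  intro sdnf dnf n _
  unfold Spec_petrickConditon petrickConditon petrickConditon_alt
  rw [PySem.List.foldl_append_singleton_eq_map]
  simp only [List.nil_append]
  apply List.map_congr_left
  intro consti _
  have hA := PySem.List.foldl_append_if (fun i => isCover (PySem.List.pyGetD dnf i "") consti n)
    (id : Int → Int) (PySem.List.pyRange 0 (dnf.length) 1) []
  simp only [id] at hA
  rw [hA]
  rw [PySem.List.enumerate_eq_map_pyRange (dnf.map (altCons n)) []]
  rw [List.filter_map, List.map_map]
  simp only [List.nil_append]
  have hlen : PySem.List.len (dnf.map (altCons n)) = (dnf.length : Int) := by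
    simp [PySem.List.len]
  rw [hlen]
  rw [List.filter_congr (fun i hi => ?_)]
  · apply List.map_congr_left; intro i _; rfl
  · have hmem := (PySem.List.mem_pyRange_one).1 hi
    simp only [Function.comp]
    have h0 : 0 ≤ i := hmem.1
    have h1 : i < (dnf.length : Int) := hmem.2
    rw [PySem.List.pyGetD_eq_getElem _ "" h0 (by simpa using h1),
        PySem.List.pyGetD_eq_getElem _ ([] : List (Int × Char)) h0 (by simpa using h1)]
    simp [isCover_eq_altMatch]
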